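-- pv_equiv track=rewrite | github.com/dujebudiselic/UniversityProjects | 3rd year/Uvod u umjetnu inteligenciju - Introduction to Artificial Intelligence/lab2_refutation_resolution/refutation_resolution.py | remove_redundant_clauses
-- ===== SOURCE A (Python) =====
-- def remove_redundant_clauses(clauses):
--     non_redundant_clauses = clauses.copy()
--     for clause1 in clauses:
--         clause1_set = set(clause1.split(' v '))
--         for clause2 in clauses:
--             clause2_set = set(clause2.split(' v '))
--             if clause1_set != clause2_set and clause1_set.issubset(clause2_set) and clause2 in non_redundant_clauses:
--                 non_redundant_clauses.remove(clause2)
--     return non_redundant_clauses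
-- ===== SOURCE B (Python) =====
-- def remove_redundant_clauses(clauses):
--     sets = [set(c.split(' v ')) for c in clauses]
--     redundant = set()
--     seen = []
--     for i, s in sorted(enumerate(sets), key=lambda p: len(p[1])):
--         if any(m < len(s) and t <= s for m, t in seen):
--             redundant.add(i)
--         seen.append((len(s), s))
--     return [c for i, c in enumerate(clauses) if i not in redundant]
-- ===== Notes on version B (the rewrite author's own statement) =====
-- stated objective: faster
-- what changed: A repeatedly re-splits every clause inside a nested double scan and mutates a copy with O(n) list.remove; B splits each clause once into a precomputed literal set, sorts the indexed sets by cardinality and does one ordered scan against the already-seen smaller sets to mark redundant indices, then filters the original list by index.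
import Mathlib
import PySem

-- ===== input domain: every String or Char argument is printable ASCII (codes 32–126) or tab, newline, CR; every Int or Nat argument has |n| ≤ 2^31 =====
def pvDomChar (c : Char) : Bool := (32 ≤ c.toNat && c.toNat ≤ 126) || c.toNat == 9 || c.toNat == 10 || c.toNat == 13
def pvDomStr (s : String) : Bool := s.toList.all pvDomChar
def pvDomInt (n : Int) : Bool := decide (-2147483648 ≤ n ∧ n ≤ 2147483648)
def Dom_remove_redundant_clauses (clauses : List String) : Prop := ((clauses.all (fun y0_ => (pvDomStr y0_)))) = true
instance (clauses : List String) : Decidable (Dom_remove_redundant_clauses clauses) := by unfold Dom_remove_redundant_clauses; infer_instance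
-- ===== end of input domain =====

-- B replaces A's mutate-a-copy double scan by a sort-by-cardinality ordered scan that marks
-- redundant indices, then filters the original list by index (alternative decomposition).


-- ===== PORT A =====
-- set(c.split(' v ')): the separator is the non-empty literal ' v ', so Python's split never
-- raises and PySem.Str.split? is always some; .getD [] is never taken.
def clset (c : String) : PySem.Set String :=
  PySem.Set.ofList ((PySem.Str.split? c " v ").getD [])

def remove_redundant_clauses (clauses : List String) : List String :=
  clauses.foldl (fun non_redundant_clauses clause1 =>
    clauses.foldl (fun non_redundant_clauses clause2 =>
      if !(PySem.Set.equal (clset clause1) (clset clause2))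
          && PySem.Set.issubset (clset clause1) (clset clause2)
          && non_redundant_clauses.contains clause2 then
        (PySem.List.remove? non_redundant_clauses clause2).getD non_redundant_clauses
      else non_redundant_clauses) non_redundant_clauses) clauses

-- ===== PORT B =====
def remove_redundant_clauses_alt (clauses : List String) : List String :=
  let sets : List (PySem.Set String) := clauses.map clset
  let st :=
    (PySem.List.sorted (PySem.List.enumerate sets) (fun p => PySem.Set.len p.2) false).foldl
      (fun (st : PySem.Set Int × List (Int × PySem.Set String)) p =>
        ( if st.2.any (fun q => decide (q.1 < PySem.Set.len p.2) && PySem.Set.issubset q.2 p.2)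
          then PySem.Set.add st.1 p.1 else st.1,
          st.2 ++ [(PySem.Set.len p.2, p.2)] ))
      (PySem.Set.empty, [])
  ((PySem.List.enumerate clauses).filter (fun p => !(PySem.Set.contains st.1 p.1))).map (·.2)

-- ===== PRECONDITION & SPEC =====
def Spec_remove_redundant_clauses (clauses : List String) (out : List String) : Prop := out = remove_redundant_clauses_alt clauses
instance (clauses : List String) (out : List String) : Decidable (Spec_remove_redundant_clauses clauses out) := by unfold Spec_remove_redundant_clauses; infer_instance

-- ===== CLAIM (what is proved, stated in full; the proofs are below) =====
def Claim_equal_remove_redundant_clauses : Prop := ∀ (clauses : List String), Dom_remove_redundant_clauses clauses → Spec_remove_redundant_clauses clauses (remove_redundant_clauses clauses)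

-- ===== LEMMAS AND PROOFS =====

-- A's pairwise removal condition: clset d is a proper subset of clset c
def properB (d c : String) : Bool :=
  !(PySem.Set.equal (clset d) (clset c)) && PySem.Set.issubset (clset d) (clset c)

-- the common characterisation both ports are reduced to
def keepF (clauses : List String) : List String :=
  clauses.filter (fun c => !(clauses.any (fun d => properB d c)))

def stepA (clause1 : String) (acc : List String) (clause2 : String) : List String :=
  if properB clause1 clause2 && acc.contains clause2 then
    (PySem.List.remove? acc clause2).getD acc
  else acc

theorem A_as_stepA (clauses : List String) :
    remove_redundant_clauses clauses
      = clauses.foldl (fun acc c1 => clauses.foldl (stepA c1) acc) clauses := rfl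

theorem filter_erase_of_neg {p : String → Bool} {a : String} (l : List String)
    (h : p a = false) : (l.erase a).filter p = l.filter p := by
  induction l with
  | nil => rfl
  | cons x l ih =>
    by_cases hx : x = a
    · subst hx; simp [List.erase_cons_head, h]
    · rw [List.erase_cons_tail (by simpa using hx)]
      simp only [List.filter_cons, ih]

theorem innerA (c1 : String) : ∀ (l acc : List String),
    (∀ v, properB c1 v = true → acc.count v ≤ l.count v) →
    l.foldl (stepA c1) acc = acc.filter (fun c => !properB c1 c)
  | [], acc, h => by
    simp only [List.foldl_nil]
    symm
    rw [List.filter_eq_self]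
    intro a ha
    cases hp : properB c1 a with
    | false => simp
    | true =>
      exfalso
      have := h a hp
      simp only [List.count_nil, Nat.le_zero] at this
      exact absurd ((List.count_pos_iff).mpr ha) (by omega)
  | c2 :: l, acc, h => by
    simp only [List.foldl_cons]
    show List.foldl (stepA c1) (stepA c1 acc c2) l = _
    by_cases hc : (properB c1 c2 && acc.contains c2) = true
    · have hc2 := hc
      simp only [Bool.and_eq_true] at hc2
      have hp : properB c1 c2 = true := hc2.1
      have hmem : c2 ∈ acc := by have := hc2.2; simpa using this
      rw [show stepA c1 acc c2 = acc.erase c2 from by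
        unfold stepA
        rw [if_pos hc, PySem.List.remove?_eq_some_erase _ _ hmem, Option.getD_some]]
      rw [innerA c1 l (acc.erase c2) (fun v hv => by
        rw [List.count_erase]
        by_cases hve : v = c2
        · subst hve
          have := h v hv
          rw [List.count_cons_self] at this
          simp only [BEq.rfl, if_true]
          omega
        · have hbe : (c2 == v) = false :=
            beq_eq_false_iff_ne.mpr (fun he => hve he.symm)
          have := h v hv
          rw [List.count_cons] at this
          simp [hbe] at this ⊢
          omega)]
      exact filter_erase_of_neg acc (by simp [hp])
    · rw [show stepA c1 acc c2 = acc from by unfold stepA; rw [if_neg hc]]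
      refine innerA c1 l acc (fun v hv => ?_)
      by_cases hve : v = c2
      · subst hve
        have hnm : acc.contains v = false := by
          cases hcon : acc.contains v with
          | false => rfl
          | true => exact absurd (by rw [hv, hcon]; rfl) hc
        have : v ∉ acc := by simpa using hnm
        simp [List.count_eq_zero_of_not_mem this]
      · have hbe : (c2 == v) = false :=
          beq_eq_false_iff_ne.mpr (fun he => hve he.symm)
        have := h v hv
        rw [List.count_cons] at this
        simp [hbe] at this
        omega

theorem outerA (clauses : List String) : ∀ (l : List String) (p : String → Bool),
    l.foldl (fun acc c1 => clauses.foldl (stepA c1) acc) (clauses.filter p)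
      = clauses.filter (fun c => p c && !(l.any (fun d => properB d c)))
  | [], p => by simp
  | d :: l, p => by
    simp only [List.foldl_cons]
    rw [innerA d clauses (clauses.filter p)
        (fun v _ => List.Sublist.count_le v List.filter_sublist)]
    rw [List.filter_filter]
    rw [outerA clauses l (fun c => !properB d c && p c)]
    apply List.filter_congr
    intro c _
    cases hd : properB d c <;> cases hp : p c <;> simp [List.any_cons, hd]

theorem A_eq_keepF (clauses : List String) :
    remove_redundant_clauses clauses = keepF clauses := by
  rw [A_as_stepA]
  have h := outerA clauses clauses (fun _ => true)
  simp only [List.filter_true] at h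
  rw [h]
  unfold keepF
  apply List.filter_congr
  intro c _
  simp

-- ================= B side =================

def stepB (st : PySem.Set Int × List (Int × PySem.Set String)) (p : Int × PySem.Set String) :
    PySem.Set Int × List (Int × PySem.Set String) :=
  ( if st.2.any (fun q => decide (q.1 < PySem.Set.len p.2) && PySem.Set.issubset q.2 p.2)
    then PySem.Set.add st.1 p.1 else st.1,
    st.2 ++ [(PySem.Set.len p.2, p.2)] )

-- global redundancy test: some clause set is strictly smaller and a subset
def Tst (sets : List (PySem.Set String)) (s : PySem.Set String) : Bool :=
  sets.any (fun t => decide (PySem.Set.len t < PySem.Set.len s) && PySem.Set.issubset t s)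

theorem B_as_stepB (clauses : List String) :
    remove_redundant_clauses_alt clauses
      = ((PySem.List.enumerate clauses).filter (fun p =>
          !(PySem.Set.contains
            ((PySem.List.sorted (PySem.List.enumerate (clauses.map clset))
                (fun p => PySem.Set.len p.2) false).foldl stepB (PySem.Set.empty, [])).1
            p.1))).map (·.2) := rfl

theorem foldB (sets : List (PySem.Set String)) :
    ∀ (l pre : List (Int × PySem.Set String)) (red : PySem.Set Int),
    PySem.List.sorted (PySem.List.enumerate sets) (fun p => PySem.Set.len p.2) false = pre ++ l →
    (l.foldl stepB (red, pre.map (fun p => (PySem.Set.len p.2, p.2)))).1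
      = l.foldl (fun r p => if Tst sets p.2 then PySem.Set.add r p.1 else r) red
  | [], _, _, _ => rfl
  | p :: l, pre, red, hsp => by
    have htest : (pre.map (fun q => (PySem.Set.len q.2, q.2))).any
        (fun q => decide (q.1 < PySem.Set.len p.2) && PySem.Set.issubset q.2 p.2)
        = Tst sets p.2 := by
      rw [List.any_map]
      unfold Tst
      rw [Bool.eq_iff_iff]
      simp only [List.any_eq_true, Function.comp]
      constructor
      · rintro ⟨q, hq, hcond⟩
        refine ⟨q.2, ?_, hcond⟩
        have hq' : q ∈ PySem.List.enumerate sets := by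
          rw [← PySem.List.mem_sorted (key := fun p => PySem.Set.len p.2) (rev := false), hsp]
          exact List.mem_append_left _ hq
        have hms := PySem.List.map_snd_enumerate sets 0
        rw [← hms]
        exact List.mem_map_of_mem hq'
      · rintro ⟨t, ht, hcond⟩
        have hms := PySem.List.map_snd_enumerate sets 0
        rw [← hms] at ht
        obtain ⟨q, hq, hq2⟩ := List.mem_map.mp ht
        subst hq2
        rw [← PySem.List.mem_sorted (key := fun p => PySem.Set.len p.2) (rev := false), hsp] at hq
        rcases List.mem_append.mp hq with hpre | hrest
        · exact ⟨q, hpre, hcond⟩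
        · exfalso
          have hpw := PySem.List.sorted_pairwise (PySem.List.enumerate sets)
            (fun p => PySem.Set.len p.2)
          rw [hsp] at hpw
          have hle : PySem.Set.len p.2 ≤ PySem.Set.len q.2 := by
            rcases List.mem_cons.mp hrest with he | hl
            · subst he; exact le_refl _
            · exact (List.pairwise_cons.mp (List.pairwise_append.mp hpw).2.1).1 q hl
          simp only [Bool.and_eq_true, decide_eq_true_eq] at hcond
          omega
    simp only [List.foldl_cons]
    show (List.foldl stepB (stepB (red, pre.map fun p => (PySem.Set.len p.2, p.2)) p) l).1 = _
    unfold stepB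
    rw [htest]
    have hmap : (pre.map fun q => (PySem.Set.len q.2, q.2)) ++ [(PySem.Set.len p.2, p.2)]
        = (pre ++ [p]).map fun q => (PySem.Set.len q.2, q.2) := by
      simp
    have hsp' : PySem.List.sorted (PySem.List.enumerate sets)
        (fun p => PySem.Set.len p.2) false = (pre ++ [p]) ++ l := by
      rw [hsp]; simp
    cases hT : Tst sets p.2 with
    | true =>
      simp only [if_true]
      rw [hmap]
      exact foldB sets l (pre ++ [p]) (PySem.Set.add red p.1) hsp'
    | false =>
      simp only [Bool.false_eq_true, if_false]
      rw [hmap]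
      exact foldB sets l (pre ++ [p]) red hsp'

-- membership in the final redundant-index set
theorem mem_redB (sets : List (PySem.Set String)) (j : Int) :
    (j ∈ ((PySem.List.sorted (PySem.List.enumerate sets)
        (fun p => PySem.Set.len p.2) false).foldl stepB (PySem.Set.empty, [])).1)
      ↔ ∃ p ∈ PySem.List.enumerate sets, Tst sets p.2 = true ∧ j = p.1 := by
  have h := foldB sets
    (PySem.List.sorted (PySem.List.enumerate sets) (fun p => PySem.Set.len p.2) false)
    [] PySem.Set.empty (by simp)
  simp only [List.map_nil] at h
  rw [h]
  rw [PySem.List.foldl_if_eq_foldl_filter (fun p => Tst sets p.2)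
      (fun r (p : Int × PySem.Set String) => PySem.Set.add r p.1)]
  rw [PySem.Set.mem_foldl_add _ (fun p : Int × PySem.Set String => p.1)]
  simp only [PySem.Set.empty, List.not_mem_nil, false_or, List.mem_filter]
  constructor
  · rintro ⟨b, ⟨hb, hT⟩, he⟩
    exact ⟨b, (PySem.List.mem_sorted ..).mp hb, hT, he⟩
  · rintro ⟨b, hb, hT, he⟩
    exact ⟨b, ⟨(PySem.List.mem_sorted ..).mpr hb, hT⟩, he⟩

-- per-pair: A's "different set and subset" is exactly "strictly smaller and subset"
theorem properB_iff (d c : String) :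
    properB d c
      = (decide (PySem.Set.len (clset d) < PySem.Set.len (clset c))
          && PySem.Set.issubset (clset d) (clset c)) := by
  unfold properB
  cases hsub : PySem.Set.issubset (clset d) (clset c) with
  | false => simp
  | true =>
    simp only [Bool.and_true]
    have hnd : (clset d).Nodup := PySem.Set.nodup_ofList _
    have hnc : (clset c).Nodup := PySem.Set.nodup_ofList _
    have hss : (clset d) ⊆ (clset c) := fun x hx =>
      (PySem.Set.issubset_iff ..).mp hsub _ hx
    have hsp : (clset d).Subperm (clset c) := List.subperm_of_subset hnd hss
    rw [Bool.eq_iff_iff]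
    simp only [Bool.not_eq_true', decide_eq_true_eq]
    constructor
    · intro hne
      rcases Nat.lt_or_ge (clset d).length (clset c).length with h | h
      · show ((clset d).length : Int) < ((clset c).length : Int)
        exact_mod_cast h
      · exfalso
        have hperm := hsp.perm_of_length_le h
        have : PySem.Set.equal (clset d) (clset c) = true :=
          (PySem.Set.equal_iff ..).mpr (fun x => hperm.mem_iff)
        rw [this] at hne
        exact Bool.noConfusion hne
    · intro hlt
      by_contra hne
      rw [Bool.not_eq_false] at hne
      have hmem := (PySem.Set.equal_iff ..).mp hne
      have hperm : (clset d).Perm (clset c) :=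
        (List.perm_ext_iff_of_nodup hnd hnc).mpr hmem
      have hlen := hperm.length_eq
      have hlt' : ((clset d).length : Int) < ((clset c).length : Int) := hlt
      omega

-- filter-by-index over enumerate equals filter-by-value when the tests agree
theorem filtmap : ∀ (xs : List String) (s : Int) (q : Int × String → Bool) (P : String → Bool),
    (∀ p ∈ PySem.List.enumerate xs s, q p = P p.2) →
    ((PySem.List.enumerate xs s).filter q).map (·.2) = xs.filter P
  | [], _, _, _, _ => rfl
  | x :: xs, s, q, P, h => by
    rw [PySem.List.enumerate_cons]
    have h0 : q (s, x) = P x :=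
      h (s, x) (by rw [PySem.List.enumerate_cons]; exact List.mem_cons_self ..)
    have ih := filtmap xs (s + 1) q P
      (fun p hp => h p (by rw [PySem.List.enumerate_cons]; exact List.mem_cons_of_mem _ hp))
    simp only [List.filter_cons, h0]
    cases hP : P x <;> simp [ih]

theorem B_eq_keepF (clauses : List String) :
    remove_redundant_clauses_alt clauses = keepF clauses := by
  rw [B_as_stepB]
  unfold keepF
  apply filtmap
  intro p hp
  obtain ⟨k, hk, hpe⟩ := (PySem.List.mem_enumerate_iff ..).mp hp
  subst hpe
  congr 1
  rw [Bool.eq_iff_iff, PySem.Set.contains_iff, mem_redB]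
  simp only [List.any_eq_true]
  constructor
  · rintro ⟨pq, hpq, hT, he⟩
    obtain ⟨k', hk', hpe'⟩ := (PySem.List.mem_enumerate_iff ..).mp hpq
    subst hpe'
    simp only at he
    have hkk : k = k' := by omega
    subst hkk
    unfold Tst at hT
    simp only [List.any_eq_true] at hT
    obtain ⟨t, ht, hcond⟩ := hT
    obtain ⟨d, hd, hde⟩ := List.mem_map.mp ht
    subst hde
    refine ⟨d, hd, ?_⟩
    rw [properB_iff]
    simp only [List.getElem_map] at hcond
    exact hcond
  · rintro ⟨d, hd, hP⟩
    have hkm : k < (clauses.map clset).length := by simpa using hk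
    refine ⟨((0 : Int) + (k : Int), (clauses.map clset)[k]'hkm), ?_, ?_, rfl⟩
    · exact (PySem.List.mem_enumerate_iff ..).mpr ⟨k, hkm, rfl⟩
    · unfold Tst
      simp only [List.any_eq_true]
      refine ⟨clset d, List.mem_map_of_mem hd, ?_⟩
      rw [properB_iff] at hP
      simp only [List.getElem_map]
      exact hP

-- ===== VERDICT (by name: the statement is the Claim_ definition above) =====
theorem remove_redundant_clauses_spec : Claim_equal_remove_redundant_clauses := by
  intro clauses _
  unfold Spec_remove_redundant_clauses
  rw [A_eq_keepF, B_eq_keepF]
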